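-- pv_equiv track=rewrite | github.com/OutOfMystic/aiframe | examples/rnn/input_data/input_data.py | load_row
-- ===== SOURCE A (Python) =====
-- def load_row(row):
--     symbolless = ''
--     for char in row:
--         if char == '-':
--             symbolless += ' '
--         elif char.isalpha() or char.isdigit() or char == ' ':
--             symbolless += char
--     words = [elem for elem in symbolless.split(' ') if elem]
--     return words
-- ===== SOURCE B (Python) =====
-- def load_row(row):
--     words = []
--     cur = []
--     for char in row:
--         if char == '-' or char == ' ':
--             if cur:
--                 words.append(''.join(cur))
--             cur = []
--         elif char.isalpha() or char.isdigit():
--             cur.append(char)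
--     if cur:
--         words.append(''.join(cur))
--     return words
-- ===== Notes on version B (the rewrite author's own statement) =====
-- stated objective: simpler
-- what changed: Single-pass tokenizer that flushes a current-word buffer at each separator character replaces A's build-filtered-string-then-split-then-filter pipeline.
import Mathlib
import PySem

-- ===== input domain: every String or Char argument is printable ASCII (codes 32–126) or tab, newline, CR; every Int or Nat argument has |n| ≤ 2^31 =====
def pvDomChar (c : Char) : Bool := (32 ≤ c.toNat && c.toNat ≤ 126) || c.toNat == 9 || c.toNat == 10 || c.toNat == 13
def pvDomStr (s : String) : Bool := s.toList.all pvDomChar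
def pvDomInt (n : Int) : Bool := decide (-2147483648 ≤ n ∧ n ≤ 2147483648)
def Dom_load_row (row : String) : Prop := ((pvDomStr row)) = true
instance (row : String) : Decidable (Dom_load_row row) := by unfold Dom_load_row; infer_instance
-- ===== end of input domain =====

-- B replaces A's build-filtered-string, split, drop-empties pipeline by a single-pass
-- tokenizer with a current-word buffer (objective: simpler decomposition, same O(n) cost).

-- ===== PORT A =====
-- filter loop of A: symbolless built char by char (List Char for the string under construction)
def load_row_filterStep (s : List Char) (c : Char) : List Char :=
  if c = '-' then s ++ [' ']
  else if PySem.Chars.isalpha c || PySem.Chars.isdigit c || c = ' ' then s ++ [c]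
  else s

def load_row (row : String) : List String :=
  let symbolless := row.toList.foldl load_row_filterStep []
  (((PySem.Chars.splitOn symbolless [' ']).filter (fun e => decide (e ≠ []))).map String.mk)

-- ===== PORT B =====
-- B's loop: result list so far, current word buffer, remaining chars
def load_row_tok (res : List (List Char)) (cur : List Char) : List Char → List (List Char)
  | [] => res ++ (if cur = [] then [] else [cur])
  | c :: t =>
    if c = '-' || c = ' ' then
      load_row_tok (res ++ (if cur = [] then [] else [cur])) [] t
    else if PySem.Chars.isalpha c || PySem.Chars.isdigit c then
      load_row_tok res (cur ++ [c]) t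
    else
      load_row_tok res cur t

def load_row_alt (row : String) : List String :=
  (load_row_tok [] [] row.toList).map String.mk

-- ===== PRECONDITION & SPEC =====
def Spec_load_row (row : String) (out : List String) : Prop := out = load_row_alt row
instance (row : String) (out : List String) : Decidable (Spec_load_row row out) := by unfold Spec_load_row; infer_instance

-- ===== CLAIM (what is proved, stated in full; the proofs are below) =====
def Claim_equal_load_row : Prop := ∀ (row : String), Dom_load_row row → Spec_load_row row (load_row row)

-- ===== LEMMAS AND PROOFS =====

-- what A's filter loop appends for one char
def pvG (c : Char) : List Char :=
  if c = '-' then [' ']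
  else if PySem.Chars.isalpha c || PySem.Chars.isdigit c || c = ' ' then [c]
  else []

lemma pv_foldA (cs : List Char) (acc : List Char) :
    cs.foldl load_row_filterStep acc = acc ++ cs.flatMap pvG := by
  induction cs generalizing acc with
  | nil => simp
  | cons c t ih =>
    simp only [List.foldl_cons, List.flatMap_cons, ih]
    unfold load_row_filterStep pvG
    split_ifs <;> simp

-- reference split-on-single-space, carrying the prefix of the first chunk
def pvSplitSp (pre : List Char) : List Char → List (List Char)
  | [] => [pre]
  | c :: t => if c = ' ' then pre :: pvSplitSp [] t else pvSplitSp (pre ++ [c]) t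

lemma pv_go_eq (fuel : Nat) : ∀ (l cur : List Char) (acc : List (List Char)),
    l.length < fuel →
    PySem.Chars.splitOn.go [' '] fuel l cur acc = acc.reverse ++ pvSplitSp cur.reverse l := by
  induction fuel with
  | zero => intro l cur acc h; omega
  | succ n ih =>
    intro l cur acc h
    cases l with
    | nil => simp [PySem.Chars.splitOn.go, pvSplitSp]
    | cons c t =>
      by_cases hc : c = ' '
      · subst hc
        rw [show PySem.Chars.splitOn.go [' '] (n+1) (' ' :: t) cur acc
              = PySem.Chars.splitOn.go [' '] n t [] (cur.reverse :: acc) by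
            simp [PySem.Chars.splitOn.go, List.isPrefixOf]]
        rw [ih t [] (cur.reverse :: acc) (by simp at h; omega)]
        simp [pvSplitSp]
      · rw [show PySem.Chars.splitOn.go [' '] (n+1) (c :: t) cur acc
              = PySem.Chars.splitOn.go [' '] n t (c :: cur) acc by
            simp only [PySem.Chars.splitOn.go, List.isPrefixOf]
            rw [if_neg (by simp [Ne.symm hc])]]
        rw [ih t (c :: cur) acc (by simp at h; omega)]
        simp [pvSplitSp, hc]

lemma pv_splitOn_eq (s : List Char) :
    PySem.Chars.splitOn s [' '] = pvSplitSp [] s := by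
  show PySem.Chars.splitOn.go [' '] (s.length + 1) s [] [] = pvSplitSp [] s
  rw [pv_go_eq (s.length + 1) s [] [] (by omega)]
  simp

lemma pv_tok_eq (cs : List Char) : ∀ (res : List (List Char)) (cur : List Char),
    load_row_tok res cur cs
      = res ++ (pvSplitSp cur (cs.flatMap pvG)).filter (fun e => decide (e ≠ [])) := by
  induction cs with
  | nil =>
    intro res cur
    simp only [load_row_tok, List.flatMap_nil, pvSplitSp]
    by_cases h : cur = [] <;> simp [h]
  | cons c t ih =>
    intro res cur
    simp only [load_row_tok, List.flatMap_cons]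
    by_cases hf : c = '-' ∨ c = ' '
    · have hg : pvG c = [' '] := by
        rcases hf with h | h <;> subst h <;> simp [pvG, PySem.Chars.isalpha, PySem.Chars.isdigit]
      rw [if_pos (by rcases hf with h | h <;> simp [h])]
      rw [ih]
      simp only [hg, List.singleton_append, pvSplitSp]
      by_cases h : cur = [] <;> simp [h]
    · push Not at hf
      obtain ⟨hd, hs⟩ := hf
      rw [if_neg (by simp [hd, hs])]
      by_cases ha : (PySem.Chars.isalpha c || PySem.Chars.isdigit c) = true
      · have hg : pvG c = [c] := by simp [pvG, hd, ha]
        rw [if_pos ha, ih]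
        simp [pvSplitSp, hs, hg]
      · have hg : pvG c = [] := by
          simp only [pvG, if_neg hd]
          simp only [Bool.or_eq_true] at ha ⊢
          push Not at ha
          simp [ha.1, ha.2, hs]
        rw [if_neg ha, ih]
        simp [hg]

-- ===== VERDICT (by name: the statement is the Claim_ definition above) =====
theorem load_row_spec : Claim_equal_load_row := by
  intro row _
  show load_row row = load_row_alt row
  simp only [load_row, load_row_alt, pv_foldA, pv_tok_eq, pv_splitOn_eq, List.nil_append]
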